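-- pv_equiv track=rewrite | github.com/suhejian/DeepNER | tools/data_analyze.py | data_entity_info
-- ===== SOURCE A (Python) =====
-- from collections import Counter
--
-- def data_entity_info(data):
--     """
--     分析数据集的实体信息
--
--     :param data (list): 对于训练集和验证集来说每个样本有'text'和'labels', 而测试集只有'text'
--     """
--     num_entities = 0
--     entity_counter = Counter()
--     for sample in data:
--         chunks = get_entities(seq=sample['labels'])
--         num_entities += len(chunks)
--         entity_counter.update(Counter([chunk[0] for chunk in chunks]))
--     # 实体总数, 各实体类型的分布
--     return num_entities, entity_counter
--
-- def get_entity_bio(seq):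
--     """
--     由标签序列, 得到实体的相关信息
--     标注序列是以BIO的方式标注的
--
--     :param seq (list): 标注序列, 其中每个元素是一个标签
--     :return (list): list of (chunk_type, chunk_start, chunk_end)
--     Example:
--         seq = ['B-PER', 'I-PER', 'O', 'B-LOC']
--         get_entity_bio(seq)
--         #output
--         [['PER', 0,1], ['LOC', 3, 3]]
--     """
--     chunks = []
--     chunk = [-1, -1, -1]
--     for indx, tag in enumerate(seq):
--         if tag.startswith("B-"):
--             if chunk[2] != -1:
--                 # 该chunk已经构成一个实体
--                 chunks.append(chunk)
--             chunk = [-1, -1, -1]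
--             chunk[1] = indx
--             chunk[0] = tag.split('-')[1]
--             chunk[2] = indx
--             if indx == len(seq) - 1:
--                 chunks.append(chunk)
--         elif tag.startswith('I-') and chunk[1] != -1:
--             _type = tag.split('-')[1]
--             if _type == chunk[0]:
--                 chunk[2] = indx
--
--             if indx == len(seq) - 1:
--                 chunks.append(chunk)
--         else:
--             if chunk[2] != -1:
--                 chunks.append(chunk)
--             chunk = [-1, -1, -1]
--
--     return chunks
--
-- def get_entities(seq, markup='bio'):
--     '''
--     从标注序列中解析实体
--
--     :param seq (list): 标注序列, 其中每个元素是一个标签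
--     :param markup (str): 标注方式, 是'bio'还是'bioes'等
--     :return (list): list of (chunk_type, chunk_start, chunk_end).
--     '''
--     assert markup in ['bio']
--
--     if markup =='bio':
--         return get_entity_bio(seq)
-- ===== SOURCE B (Python) =====
-- from collections import Counter
--
-- def data_entity_info(data):
--     # One direct pass over the tags: every BIO chunk corresponds to exactly
--     # one 'B-' tag, typed by tag.split('-')[1], so no chunk parsing is needed.
--     num_entities = 0
--     entity_counter = Counter()
--     for sample in data:
--         for tag in sample['labels']:
--             if tag.startswith('B-'):
--                 num_entities += 1
--                 entity_counter[tag.split('-')[1]] += 1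
--     return num_entities, entity_counter
-- ===== Notes on version B (the rewrite author's own statement) =====
-- stated objective: simpler
-- what changed: B deletes the BIO chunk parser (get_entities/get_entity_bio with its chunk state machine and start/end indices) and instead counts in one direct pass, incrementing the total and the type counter at every tag starting with 'B-', since each parsed chunk corresponds to exactly one 'B-' tag typed by tag.split('-')[1].
import Mathlib
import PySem

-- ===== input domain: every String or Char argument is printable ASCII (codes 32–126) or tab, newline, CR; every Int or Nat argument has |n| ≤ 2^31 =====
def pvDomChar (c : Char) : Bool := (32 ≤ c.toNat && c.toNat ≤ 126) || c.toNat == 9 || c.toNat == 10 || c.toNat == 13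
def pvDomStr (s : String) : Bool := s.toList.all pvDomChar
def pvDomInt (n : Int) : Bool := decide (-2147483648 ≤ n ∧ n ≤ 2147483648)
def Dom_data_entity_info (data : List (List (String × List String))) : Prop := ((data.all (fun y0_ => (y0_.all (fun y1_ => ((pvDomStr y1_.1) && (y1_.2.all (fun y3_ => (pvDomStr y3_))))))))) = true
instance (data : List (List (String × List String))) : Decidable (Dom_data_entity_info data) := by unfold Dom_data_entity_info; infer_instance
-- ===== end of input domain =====

-- B drops A's BIO chunk parser and counts entities in one direct pass over the tags
-- (each chunk corresponds to exactly one 'B-' tag); same return value, objective: simpler.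


-- ===== PORT A =====
-- tag.split('-')[1]: both Pythons evaluate this exact expression; it is only reached on tags
-- starting with "B-"/"I-", where the split has at least two pieces (and sep "-" ≠ "", so split? is some).
def pvSplitType (tag : String) : String :=
  ((PySem.Str.split? tag "-").getD []).getD 1 ""

-- sample['labels'] — first-match lookup; a missing key (Python KeyError) is excluded by Pre_.
def pvLabels (sample : List (String × List String)) : List String :=
  ((PySem.Dict.mk sample).get? "labels").getD []

-- the loop of get_entity_bio; chunk = [-1, -1, -1] is modelled as (none, -1, -1):
-- chunk[0] holds -1 or a string in Python, and '_type == chunk[0]' is False while chunk[0] is -1,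
-- which 'some _ = none' being False reproduces exactly.
def pvBioLoop (n : Int) : Int → List (Option String × Int × Int) → (Option String × Int × Int) →
    List String → List (Option String × Int × Int)
  | _, chunks, _, [] => chunks
  | indx, chunks, chunk, tag :: rest =>
    if PySem.Str.startswith tag "B-" then
      let chunks1 := if chunk.2.2 ≠ -1 then chunks ++ [chunk] else chunks
      let chunk' : Option String × Int × Int := (some (pvSplitType tag), indx, indx)
      let chunks2 := if indx = n - 1 then chunks1 ++ [chunk'] else chunks1
      pvBioLoop n (indx + 1) chunks2 chunk' rest
    else if PySem.Str.startswith tag "I-" && decide (chunk.2.1 ≠ -1) then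
      let chunk' := if some (pvSplitType tag) = chunk.1 then (chunk.1, chunk.2.1, indx) else chunk
      let chunks1 := if indx = n - 1 then chunks ++ [chunk'] else chunks
      pvBioLoop n (indx + 1) chunks1 chunk' rest
    else
      let chunks1 := if chunk.2.2 ≠ -1 then chunks ++ [chunk] else chunks
      pvBioLoop n (indx + 1) chunks1 ((none : Option String), (-1 : Int), (-1 : Int)) rest

def pvGetEntityBio (seq : List String) : List (Option String × Int × Int) :=
  pvBioLoop (seq.length : Int) 0 [] (none, -1, -1) seq

-- get_entities(seq) with the default markup='bio' (the only markup A passes; assert holds)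
def pvGetEntities (seq : List String) : List (Option String × Int × Int) :=
  pvGetEntityBio seq

-- entity_counter.update(Counter([chunk[0] for chunk in chunks])) increments per chunk type, in
-- chunk order (exact: same counts and same key insertion order as the Counter-of-list update).
def data_entity_info (data : List (List (String × List String))) : Int × (List (String × Int)) :=
  let res := data.foldl
    (fun (st : Int × PySem.Dict String Int) sample =>
      let chunks := pvGetEntities (pvLabels sample)
      let num := st.1 + (chunks.length : Int)
      let ctr := (chunks.map (fun c => c.1.getD "")).foldl
        (fun d x => d.modify x 0 (· + 1)) st.2
      (num, ctr))
    (0, PySem.Dict.empty)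
  (res.1, res.2.items)

-- ===== PORT B =====
def data_entity_info_alt (data : List (List (String × List String))) : Int × (List (String × Int)) :=
  let res := data.foldl
    (fun (st : Int × PySem.Dict String Int) sample =>
      (pvLabels sample).foldl
        (fun (st : Int × PySem.Dict String Int) tag =>
          if PySem.Str.startswith tag "B-" then
            ((st.1 + 1 : Int), st.2.modify (pvSplitType tag) 0 (· + 1))
          else st)
        st)
    (0, PySem.Dict.empty)
  (res.1, res.2.items)

-- ===== PRECONDITION & SPEC =====
-- A raises KeyError on sample['labels'] when a sample lacks the key 'labels'; Pre_ excludes exactly those inputs (B raises there too).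
def Pre_data_entity_info (data : List (List (String × List String))) : Prop :=
  ∀ sample ∈ data, "labels" ∈ sample.map Prod.fst
instance (data : List (List (String × List String))) : Decidable (Pre_data_entity_info data) := by unfold Pre_data_entity_info; infer_instance
def pvWitness_data_entity_info : (List (List (String × List String))) :=
  [[("labels", ["B-PER", "I-PER", "O", "B-LOC"])]]
def Spec_data_entity_info (data : List (List (String × List String))) (out : Int × (List (String × Int))) : Prop := out = data_entity_info_alt data
instance (data : List (List (String × List String))) (out : Int × (List (String × Int))) : Decidable (Spec_data_entity_info data out) := by unfold Spec_data_entity_info; infer_instance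

-- ===== CLAIM (what is proved, stated in full; the proofs are below) =====
def Claim_equal_data_entity_info : Prop := ∀ (data : List (List (String × List String))), Dom_data_entity_info data → Pre_data_entity_info data → Spec_data_entity_info data (data_entity_info data)

-- ===== LEMMAS AND PROOFS =====

-- the types of the B- tags of seq, in order: what feeds both ports' counters
def pvBTypes (seq : List String) : List String :=
  (seq.filter (fun t => PySem.Str.startswith t "B-")).map pvSplitType

def pvProj (c : Option String × Int × Int) : String := c.1.getD ""

-- the pending open chunk's type, if any
def pvPend (chunk : Option String × Int × Int) : List String :=
  if chunk.2.2 = -1 then [] else [pvProj chunk]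

-- loop invariant of get_entity_bio: chunk[2] = -1 forces chunk[1] = -1
def pvInv (chunk : Option String × Int × Int) : Prop := chunk.2.2 = -1 → chunk.2.1 = -1

-- the heart: the chunks produced by A's BIO state machine, projected to their types,
-- are exactly the accumulated chunks, plus the open chunk, plus one entry per B- tag left.
lemma pvBioLoop_types (rest : List String) : ∀ (i : Nat) chunks chunk, pvInv chunk → rest ≠ [] →
    (pvBioLoop ((i : Int) + rest.length) i chunks chunk rest).map pvProj
      = chunks.map pvProj ++ pvPend chunk ++ pvBTypes rest := by
  induction rest with
  | nil => intro _ _ _ _ h; exact absurd rfl h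
  | cons t rest ih =>
    intro i chunks chunk hinv _
    by_cases hrest : rest = []
    · subst hrest
      have hidx : (i : Int) = (i : Int) + (([t] : List String).length : Int) - 1 := by simp
      simp only [pvBioLoop]
      by_cases hB : PySem.Str.startswith t "B-"
      · simp only [hB, if_true, ← hidx, if_pos, pvBioLoop]
        simp only [pvBTypes, List.filter_cons, hB, List.filter_nil, List.map_cons, List.map_nil]
        split_ifs with h1 <;> simp [pvPend, pvProj, h1]
      · simp only [hB, Bool.false_eq_true, if_false]
        by_cases hI : (PySem.Str.startswith t "I-" && decide (chunk.2.1 ≠ -1)) = true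
        · have h21 : chunk.2.1 ≠ -1 := by simpa using (Bool.and_eq_true _ _ |>.mp hI).2
          have h22 : chunk.2.2 ≠ -1 := fun h => h21 (hinv h)
          simp only [hI, if_true, ← hidx, if_pos]
          simp only [pvBTypes, List.filter_cons, hB, Bool.false_eq_true, if_false,
            List.filter_nil, List.map_nil, List.append_nil]
          split_ifs with h1
          · simp [pvPend, h22, pvProj, ← h1]
          · simp [pvPend, h22]
        · simp only [hI, Bool.false_eq_true, if_false]
          simp only [pvBTypes, List.filter_cons, hB, Bool.false_eq_true, if_false,
            List.filter_nil, List.map_nil, List.append_nil]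
          split_ifs with h1 <;> simp [pvPend, pvProj, h1]
    · have hne : (i : Int) ≠ (i : Int) + ((t :: rest).length : Int) - 1 := by
        have : rest.length ≠ 0 := fun h => hrest (List.eq_nil_of_length_eq_zero h)
        simp only [List.length_cons]; push_cast; omega
      have hn : ((i : Int) + ((t :: rest).length : Int)) = (((i+1 : Nat)) : Int) + (rest.length : Int) := by
        simp only [List.length_cons]; push_cast; ring
      simp only [pvBioLoop]
      by_cases hB : PySem.Str.startswith t "B-"
      · simp only [hB, if_true, if_neg hne]
        rw [show ((i : Int) + 1) = ((i + 1 : Nat) : Int) by push_cast; ring, hn,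
          ih (i+1) _ _ (by intro h; simp at h) hrest]
        simp only [pvBTypes, List.filter_cons, hB, if_true, List.map_cons]
        have : pvPend (some (pvSplitType t), (i : Int), (i : Int)) = [pvSplitType t] := by
          simp [pvPend, pvProj]
        rw [this]
        split_ifs with h1 <;> simp [pvPend, pvProj, h1]
      · simp only [hB, Bool.false_eq_true, if_false]
        by_cases hI : (PySem.Str.startswith t "I-" && decide (chunk.2.1 ≠ -1)) = true
        · have h21 : chunk.2.1 ≠ -1 := by simpa using (Bool.and_eq_true _ _ |>.mp hI).2
          have h22 : chunk.2.2 ≠ -1 := fun h => h21 (hinv h)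
          simp only [hI, if_true, if_neg hne]
          rw [show ((i : Int) + 1) = ((i + 1 : Nat) : Int) by push_cast; ring, hn]
          by_cases h1 : some (pvSplitType t) = chunk.1
          · simp only [if_pos h1]
            have hinv1 : pvInv (chunk.1, chunk.2.1, (i : Int)) := by intro h; simp at h
            rw [ih (i+1) _ _ hinv1 hrest]
            simp only [pvBTypes, List.filter_cons, hB, Bool.false_eq_true, if_false]
            simp [pvPend, pvProj, h22, ← h1]
          · simp only [if_neg h1]
            rw [ih (i+1) _ _ hinv hrest]
            simp only [pvBTypes, List.filter_cons, hB, Bool.false_eq_true, if_false]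
        · simp only [hI, Bool.false_eq_true, if_false]
          rw [show ((i : Int) + 1) = ((i + 1 : Nat) : Int) by push_cast; ring, hn,
            ih (i+1) _ _ (by intro _; rfl) hrest]
          simp only [pvBTypes, List.filter_cons, hB, Bool.false_eq_true, if_false]
          split_ifs with h1 <;> simp [pvPend, pvProj, h1]

-- one chunk per B- tag, typed by tag.split('-')[1]
lemma pvGetEntities_types (seq : List String) :
    (pvGetEntities seq).map pvProj = pvBTypes seq := by
  cases seq with
  | nil => simp [pvGetEntities, pvGetEntityBio, pvBioLoop, pvBTypes]
  | cons t rest =>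
    have h := pvBioLoop_types (t :: rest) 0 [] (none, -1, -1) (fun _ => rfl) (by simp)
    simpa [pvGetEntities, pvGetEntityBio, pvPend] using h

-- B's inner pass over the tags ≡ counting/incrementing once per B- type
lemma pvAltInner (labels : List String) : ∀ (st : Int × PySem.Dict String Int),
    labels.foldl (fun st tag => if PySem.Str.startswith tag "B-" then
        ((st.1 + 1 : Int), st.2.modify (pvSplitType tag) 0 (· + 1)) else st) st
    = (st.1 + ((pvBTypes labels).length : Int),
       (pvBTypes labels).foldl (fun d x => d.modify x 0 (· + 1)) st.2) := by
  induction labels with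
  | nil => intro st; simp [pvBTypes]
  | cons t rest ih =>
    intro st
    by_cases hB : PySem.Str.startswith t "B-"
    · simp only [List.foldl_cons, hB, if_true, ih, pvBTypes, List.filter_cons, List.map_cons]
      refine Prod.ext ?_ rfl
      simp only [List.length_cons]
      push_cast
      ring
    · simp only [List.foldl_cons, hB, Bool.false_eq_true, if_false, ih, pvBTypes,
        List.filter_cons]

-- ===== VERDICT (by name: the statement is the Claim_ definition above) =====
theorem data_entity_info_spec : Claim_equal_data_entity_info := by
  intro data _ _
  show data_entity_info data = data_entity_info_alt data
  simp only [data_entity_info, data_entity_info_alt]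
  have hstep : (fun (st : Int × PySem.Dict String Int) (sample : List (String × List String)) =>
      let chunks := pvGetEntities (pvLabels sample)
      let num := st.1 + (chunks.length : Int)
      let ctr := (chunks.map (fun c => c.1.getD "")).foldl
        (fun d x => d.modify x 0 (· + 1)) st.2
      ((num, ctr) : Int × PySem.Dict String Int))
    = (fun (st : Int × PySem.Dict String Int) sample =>
      (pvLabels sample).foldl
        (fun (st : Int × PySem.Dict String Int) tag =>
          if PySem.Str.startswith tag "B-" then
            ((st.1 + 1 : Int), st.2.modify (pvSplitType tag) 0 (· + 1))
          else st)
        st) := by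
    funext st sample
    rw [pvAltInner]
    have h := pvGetEntities_types (pvLabels sample)
    simp only [show (fun (c : Option String × Int × Int) => c.1.getD "") = pvProj from rfl, h]
    have hlen : (pvGetEntities (pvLabels sample)).length = (pvBTypes (pvLabels sample)).length := by
      rw [← h, List.length_map]
    rw [hlen]
  rw [hstep]
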